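-- pv_equiv track=rewrite | github.com/fangyuchu/vllm-ascend | vllm_ascend/worker/descale.py | distribute_experts
-- ===== SOURCE A (Python) =====
-- def distribute_experts(global_num_expert: int, ep_size: int) -> dict[int, list[int]]:
--     init_global_expert_distribution = {}
--     base = global_num_expert // ep_size
--     remainder = global_num_expert % ep_size
--
--     start_index = 0
--     for rank in range(ep_size):
--         num = base + (1 if rank < remainder else 0)
--         expert_ids = list(range(start_index, start_index + num))
--         init_global_expert_distribution[rank] = expert_ids
--         start_index += num
--     return init_global_expert_distribution
-- ===== SOURCE B (Python) =====
-- def distribute_experts(global_num_expert: int, ep_size: int) -> dict[int, list[int]]: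
--     base, remainder = divmod(global_num_expert, ep_size)
--     return {
--         rank: list(range(rank * base + min(rank, remainder),
--                          (rank + 1) * base + min(rank + 1, remainder)))
--         for rank in range(ep_size)
--     }
-- ===== Notes on version B (the rewrite author's own statement) =====
-- stated objective: alternative
-- what changed: The stateful running start_index accumulator is eliminated: each rank's slice boundaries are computed in closed form (start = rank*base + min(rank, remainder)) inside a dict comprehension, so every rank's entry is independent.
import Mathlib
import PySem

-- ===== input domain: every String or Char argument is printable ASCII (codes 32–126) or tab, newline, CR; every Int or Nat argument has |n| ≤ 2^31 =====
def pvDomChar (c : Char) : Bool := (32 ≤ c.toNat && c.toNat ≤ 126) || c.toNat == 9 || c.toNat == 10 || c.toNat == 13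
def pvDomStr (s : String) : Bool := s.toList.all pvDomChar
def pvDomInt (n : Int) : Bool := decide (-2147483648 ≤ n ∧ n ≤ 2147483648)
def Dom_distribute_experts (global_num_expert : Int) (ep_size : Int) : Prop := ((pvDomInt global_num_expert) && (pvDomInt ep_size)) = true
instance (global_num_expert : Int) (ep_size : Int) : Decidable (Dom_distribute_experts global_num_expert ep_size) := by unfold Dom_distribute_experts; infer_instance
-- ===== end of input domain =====

-- B replaces A's running start_index accumulator by a closed-form boundary
-- (start = rank*base + min(rank, remainder)) computed independently per rank (objective: alternative).


-- ===== PORT A =====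
def distribute_experts (global_num_expert : Int) (ep_size : Int) : List (Int × List Int) :=
  let base := PySem.Int.floordiv global_num_expert ep_size
  let remainder := PySem.Int.mod global_num_expert ep_size
  let st := (PySem.List.pyRange 0 ep_size 1).foldl
    (fun (s : PySem.Dict Int (List Int) × Int) rank =>
      let num := base + (if rank < remainder then (1 : Int) else 0)
      let expert_ids := PySem.List.pyRange s.2 (s.2 + num) 1
      (s.1.insert rank expert_ids, s.2 + num))
    (PySem.Dict.empty, 0)
  st.1.items

-- ===== PORT B =====
def distribute_experts_alt (global_num_expert : Int) (ep_size : Int) : List (Int × List Int) :=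
  let base := PySem.Int.floordiv global_num_expert ep_size
  let remainder := PySem.Int.mod global_num_expert ep_size
  (PySem.List.pyRange 0 ep_size 1).map (fun rank =>
    (rank, PySem.List.pyRange (rank * base + min rank remainder)
                              ((rank + 1) * base + min (rank + 1) remainder) 1))

-- ===== PRECONDITION & SPEC =====
-- Python raises ZeroDivisionError at ep_size = 0 (both A and B); excluded.
def Pre_distribute_experts (global_num_expert : Int) (ep_size : Int) : Prop := ep_size ≠ 0
instance (global_num_expert : Int) (ep_size : Int) : Decidable (Pre_distribute_experts global_num_expert ep_size) := by unfold Pre_distribute_experts; infer_instance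
def pvWitness_distribute_experts : Int × Int := (10, 3)

def Spec_distribute_experts (global_num_expert : Int) (ep_size : Int) (out : List (Int × List Int)) : Prop := out = distribute_experts_alt global_num_expert ep_size
instance (global_num_expert : Int) (ep_size : Int) (out : List (Int × List Int)) : Decidable (Spec_distribute_experts global_num_expert ep_size out) := by unfold Spec_distribute_experts; infer_instance

-- ===== CLAIM (what is proved, stated in full; the proofs are below) =====
def Claim_equal_distribute_experts : Prop := ∀ (global_num_expert : Int) (ep_size : Int), Dom_distribute_experts global_num_expert ep_size → Pre_distribute_experts global_num_expert ep_size → Spec_distribute_experts global_num_expert ep_size (distribute_experts global_num_expert ep_size)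

-- ===== LEMMAS AND PROOFS =====

-- A's loop, restricted to ranks 0..n-1, characterised: the dict's items are B's
-- per-rank closed-form entries and the running start_index is n*base + min n rem.
lemma distribute_experts_loop (base rem : Int) (hrem : 0 ≤ rem) (n : Nat) :
    (PySem.List.pyRange 0 (n : Int) 1).foldl
      (fun (s : PySem.Dict Int (List Int) × Int) rank =>
        (s.1.insert rank
          (PySem.List.pyRange s.2 (s.2 + (base + if rank < rem then (1 : Int) else 0)) 1),
         s.2 + (base + if rank < rem then (1 : Int) else 0)))
      (PySem.Dict.empty, 0)
    = (PySem.Dict.mk ((PySem.List.pyRange 0 (n : Int) 1).map (fun k =>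
          (k, PySem.List.pyRange (k * base + min k rem)
            ((k + 1) * base + min (k + 1) rem) 1))),
       (n : Int) * base + min (n : Int) rem) := by
  induction n with
  | zero =>
    simp only [Nat.cast_zero, PySem.List.pyRange_zero, zero_mul, zero_add, min_eq_left hrem]
    rfl
  | succ n ih =>
    have hcast : ((n + 1 : Nat) : Int) = (n : Int) + 1 := by push_cast; ring
    rw [hcast, PySem.List.pyRange_one_succ_right (by positivity), List.foldl_append,
      List.map_append, ih]
    simp only [List.foldl_cons, List.foldl_nil, List.map_cons, List.map_nil]
    have hstart : (n : Int) * base + min (n : Int) rem +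
        (base + (if (n : Int) < rem then (1 : Int) else 0))
        = ((n : Int) + 1) * base + min ((n : Int) + 1) rem := by
      split_ifs with h
      · rw [min_eq_left (by omega), min_eq_left (by omega)]; ring
      · rw [min_eq_right (by omega), min_eq_right (by omega)]; ring
    have hfresh : (PySem.Dict.mk ((PySem.List.pyRange 0 (n : Int) 1).map (fun k =>
          (k, PySem.List.pyRange (k * base + min k rem)
            ((k + 1) * base + min (k + 1) rem) 1)))).contains (n : Int) = false := by
      simp only [PySem.Dict.contains_mk, List.any_map, List.any_eq_false, Function.comp]
      intro k hk
      have := (PySem.List.mem_pyRange_one.mp hk).2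
      simp only [beq_iff_eq]
      omega
    refine Prod.ext ?_ ?_
    · apply PySem.Dict.ext
      rw [PySem.Dict.items_insert_of_not_contains]
      case h => exact hfresh
      simp only
      congr 2
      rw [hstart]
    · exact hstart

theorem distribute_experts_spec : Claim_equal_distribute_experts := by
  intro g e _ hpre
  unfold Spec_distribute_experts
  simp only [distribute_experts, distribute_experts_alt]
  rcases lt_trichotomy e 0 with he | he | he
  · -- ep_size < 0: the range is empty, both sides are []
    have hnil : PySem.List.pyRange 0 e 1 = [] := by
      rw [PySem.List.pyRange_one]
      have h0 : (e - 0).toNat = 0 := by omega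
      rw [h0]; rfl
    rw [hnil]; rfl
  · exact absurd he hpre
  · have hrem : 0 ≤ PySem.Int.mod g e := PySem.Int.mod_nonneg g he
    obtain ⟨n, hn⟩ : ∃ n : Nat, e = (n : Int) := ⟨e.toNat, (Int.toNat_of_nonneg he.le).symm⟩
    subst hn
    rw [distribute_experts_loop _ _ hrem]
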